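-- pv_equiv track=rewrite | github.com/phasetr/AlgorithmsAndDataStructureByFSharp | AtCoder/DP/T04.py | solve
-- ===== SOURCE A (Python) =====
-- mod = 10**9+7
--
-- def solve(n,s):
--     dp = [[0]*(n) for i in range(n)]
--     for i in range(n):
--         dp[0][i] = 1
--
--     for i in range(n-1):
--         rui = [0]*(n+1-i)
--         for j in range(n-i): rui[j+1] = (rui[j] + dp[i][j]) % mod
--         for less in range(n-i):
--             if s[i] == "<":
--                 dp[i+1][less] = rui[less+1]
--             else:
--                 dp[i+1][less] = (rui[n-i]-rui[less+1]+mod)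
--             dp[i+1][less] %= mod
--     return dp[n-1][0]%mod
-- ===== SOURCE B (Python) =====
-- mod = 10**9 + 7
--
-- def solve(n, s):
--     # Transposed (adjoint) DP: instead of pushing a row of counts forward through
--     # the pattern, pull a coefficient vector backward from the answer cell.
--     # u starts as the unit vector picking A's answer cell dp[n-1][0]; each step i
--     # (scanned right-to-left) replaces u by the transpose of that step's linear
--     # map: suffix-sums (plus a trailing 0) for '<', prefix-sums (with a leading 0)
--     # for '>'.  The answer is the dot product of the final coefficients with the
--     # all-ones initial row, i.e. simply sum(u).
--     u = [1]
--     for i in range(n - 2, -1, -1):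
--         if s[i] == '<':
--             acc = 0
--             w = []
--             for x in reversed(u):
--                 acc = (acc + x) % mod
--                 w.append(acc)
--             w.reverse()
--             w.append(0)
--         else:
--             acc = 0
--             w = [0]
--             for x in u:
--                 acc = (acc + x) % mod
--                 w.append(acc)
--         u = w
--     return sum(u) % mod
-- ===== Notes on version B (the rewrite author's own statement) =====
-- stated objective: alternative
-- what changed: B abandons A's forward row DP (building dp[i+1] from prefix sums of dp[i] in a preallocated n-by-n table and reading dp[n-1][0]); instead it scans the pattern right-to-left, propagating a single coefficient vector backwards from the answer cell through the transpose of each step's linear map (suffix-sums plus a trailing 0 for '<', prefix-sums with a leading 0 for '>'), and returns the sum of the final coefficients against the all-ones initial row.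
import Mathlib
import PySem

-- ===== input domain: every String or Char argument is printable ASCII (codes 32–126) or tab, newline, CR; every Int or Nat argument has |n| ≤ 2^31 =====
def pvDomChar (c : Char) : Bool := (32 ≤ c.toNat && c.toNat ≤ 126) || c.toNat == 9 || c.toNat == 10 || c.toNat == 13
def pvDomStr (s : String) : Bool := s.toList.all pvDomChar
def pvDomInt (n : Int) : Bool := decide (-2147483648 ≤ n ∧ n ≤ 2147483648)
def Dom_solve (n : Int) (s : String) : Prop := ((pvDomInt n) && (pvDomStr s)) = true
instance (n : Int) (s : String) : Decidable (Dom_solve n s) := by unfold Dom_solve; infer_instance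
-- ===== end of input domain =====

-- One line: B replaces A's forward row DP (prefix sums pushed left-to-right, answer read at
-- dp[n-1][0]) by the transposed DP: a coefficient vector pulled right-to-left from the answer
-- cell, the result being the sum of the final coefficients (objective: alternative, same cost).

-- ===== PORT A =====
def solve (n : Int) (s : String) : Int :=
  let N := n.toNat
  let dp0 : List (List Int) := List.replicate N (List.replicate N 0)
  let dp1 := (List.range N).foldl (fun dp i => dp.set 0 ((dp.getD 0 []).set i 1)) dp0
  let dp2 := (List.range (N - 1)).foldl (fun dp i =>
      let rui := (List.range (N - i)).foldl
        (fun r j => r.set (j + 1) ((r.getD j 0 + (dp.getD i []).getD j 0) % 1000000007))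
        (List.replicate (N + 1 - i) 0)
      let row := (List.range (N - i)).foldl (fun row less =>
          let v : Int := if s.toList.getD i ' ' = '<' then rui.getD (less + 1) 0
                         else (rui.getD (N - i) 0 - rui.getD (less + 1) 0 + 1000000007)
          row.set less (v % 1000000007)) (dp.getD (i + 1) [])
      dp.set (i + 1) row) dp1
  (dp2.getD (N - 1) []).getD 0 0 % 1000000007

-- ===== PORT B =====
def solve_alt (n : Int) (s : String) : Int :=
  let u := (PySem.List.pyRange (n - 2) (-1) (-1)).foldl (fun u i =>
    if s.toList.getD i.toNat ' ' = '<' then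
      ((u.reverse.foldl (fun (st : Int × List Int) x =>
          ((st.1 + x) % 1000000007, st.2 ++ [(st.1 + x) % 1000000007]))
          ((0 : Int), ([] : List Int))).2).reverse ++ [0]
    else
      (u.foldl (fun (st : Int × List Int) x =>
          ((st.1 + x) % 1000000007, st.2 ++ [(st.1 + x) % 1000000007]))
          ((0 : Int), [(0 : Int)])).2) [(1 : Int)]
  u.sum % 1000000007

-- ===== PRECONDITION & SPEC =====
-- Pre_ excludes exactly the inputs where Python A raises an IndexError: n < 1 (dp[n-1] on an
-- empty/short table) or a string shorter than n-1 (s[i] out of range).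
def Pre_solve (n : Int) (s : String) : Prop := 1 ≤ n ∧ n - 1 ≤ (s.toList.length : Int)
instance (n : Int) (s : String) : Decidable (Pre_solve n s) := by unfold Pre_solve; infer_instance
def pvWitness_solve : Int × String := (3, "<>")
def Spec_solve (n : Int) (s : String) (out : Int) : Prop := out = solve_alt n s
instance (n : Int) (s : String) (out : Int) : Decidable (Spec_solve n s out) := by unfold Spec_solve; infer_instance

-- ===== CLAIM (what is proved, stated in full; the proofs are below) =====
def Claim_equal_solve : Prop := ∀ (n : Int) (s : String), Dom_solve n s → Pre_solve n s → Spec_solve n s (solve n s)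

-- ===== LEMMAS AND PROOFS =====

-- basic getD/set/take facts
lemma pv_getD_set_self {a : Type} (d : a) (l : List a) (i : Nat) (x : a) (h : i < l.length) :
    (l.set i x).getD i d = x := by simp [List.getD, h]

lemma pv_getD_set_ne {a : Type} (d : a) (l : List a) {i j : Nat} (x : a) (h : i ≠ j) :
    (l.set i x).getD j d = l.getD j d := by simp [List.getD, h]

lemma pv_getD_take (l : List Int) {t m : Nat} (h : t < m) : (l.take m).getD t 0 = l.getD t 0 := by
  simp [List.getD, h]

lemma pv_eq_of_getD (xs ys : List Int) (hl : xs.length = ys.length)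
    (h : ∀ t, t < xs.length → xs.getD t 0 = ys.getD t 0) : xs = ys := by
  apply List.ext_getElem hl
  intro i h1 h2
  simpa [List.getD_eq_getElem, h1, h2] using h i h1

lemma pv_getD_reverse (l : List Int) (t : Nat) (h : t < l.length) :
    l.reverse.getD t 0 = l.getD (l.length - 1 - t) 0 := by
  rw [List.getD_eq_getElem _ _ (by simpa using h), List.getD_eq_getElem _ _ (by omega)]
  exact List.getElem_reverse _

lemma pv_take_succ_sum (xs : List Int) : ∀ k : Nat, (xs.take (k+1)).sum = (xs.take k).sum + xs.getD k 0 := by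
  induction xs with
  | nil => intro k; simp [List.getD]
  | cons v t ih =>
    intro k
    cases k with
    | zero => simp [List.getD]
    | succ k => simp [List.take_succ_cons, ih k, List.getD]; ring

-- length preservation for folds whose step preserves length
lemma pv_foldl_length {a : Type} (step : List a → Nat → List a)
    (h : ∀ r j, (step r j).length = r.length) :
    ∀ (l : List Nat) (init : List a), (l.foldl step init).length = init.length := by
  intro l
  induction l with
  | nil => intro init; rfl
  | cons x xs ih => intro init; rw [List.foldl_cons, ih, h]

-- a fold that writes state-independent values f j at positions j
lemma pv_foldl_set_getD (f : Nat → Int) :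
    ∀ (k : Nat) (init : List Int) (t : Nat), t < init.length →
      (((List.range k).foldl (fun r j => r.set j (f j)) init).getD t 0)
        = if t < k then f t else init.getD t 0 := by
  intro k
  induction k with
  | zero => intro init t ht; simp
  | succ k ih =>
    intro init t ht
    rw [List.range_succ, List.foldl_append]
    simp only [List.foldl_cons, List.foldl_nil]
    have hlen : ((List.range k).foldl (fun r j => r.set j (f j)) init).length = init.length :=
      pv_foldl_length _ (by intro r j; simp) _ _
    by_cases h : t = k
    · subst h
      rw [pv_getD_set_self _ _ _ _ (by rw [hlen]; exact ht)]
      simp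
    · rw [pv_getD_set_ne _ _ _ (fun he => h he.symm), ih init t ht]
      by_cases h2 : t < k
      · simp [h2, Nat.lt_succ_of_lt h2]
      · have h3 : ¬ t < k + 1 := by omega
        simp [h2, h3]

-- characterisation of A's prefix-sum array rui
lemma pv_rui_getD (a : List Int) (L : Nat) :
    ∀ (k : Nat), k < L → ∀ t : Nat,
      (((List.range k).foldl (fun r j => r.set (j+1) ((r.getD j 0 + a.getD j 0) % 1000000007))
          (List.replicate L 0)).getD t 0)
        = if 1 ≤ t ∧ t ≤ k then (a.take t).sum % 1000000007 else 0 := by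
  intro k
  induction k with
  | zero =>
    intro hk t
    have hno : ¬ (1 ≤ t ∧ t ≤ 0) := by omega
    simp only [List.range_zero, List.foldl_nil, if_neg hno, List.getD, List.getElem?_replicate]
    split_ifs <;> rfl
  | succ k ih =>
    intro hk t
    rw [List.range_succ, List.foldl_append]
    simp only [List.foldl_cons, List.foldl_nil]
    have hk' : k < L := by omega
    have hlen : (((List.range k).foldl (fun r j => r.set (j+1) ((r.getD j 0 + a.getD j 0) % 1000000007))
        (List.replicate L 0))).length = L := by
      rw [pv_foldl_length _ (by intro r j; simp) _ _]; simp
    have hget : (((List.range k).foldl (fun r j => r.set (j+1) ((r.getD j 0 + a.getD j 0) % 1000000007))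
        (List.replicate L 0))).getD k 0 = (a.take k).sum % 1000000007 := by
      rw [ih hk' k]
      by_cases h0 : k = 0
      · subst h0; simp
      · have : 1 ≤ k ∧ k ≤ k := by omega
        simp [this]
    by_cases h : t = k + 1
    · subst h
      have hc : 1 ≤ k + 1 ∧ k + 1 ≤ k + 1 := by omega
      rw [pv_getD_set_self _ _ _ _ (by rw [hlen]; omega), hget, if_pos hc, pv_take_succ_sum]
      omega
    · rw [pv_getD_set_ne _ _ _ (fun he => h he.symm), ih hk' t]
      by_cases hc : 1 ≤ t ∧ t ≤ k
      · have hc' : 1 ≤ t ∧ t ≤ k + 1 := by omega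
        simp [hc, hc']
      · have hc' : ¬ (1 ≤ t ∧ t ≤ k + 1) := by omega
        simp [hc, hc']

-- the forward accumulate-append sweep (shared shape of A's row characterisation and B's loops)
def pv_fwdL (acc : Int) : List Int → List Int
  | [] => []
  | v :: t => ((acc + v) % 1000000007) :: pv_fwdL ((acc + v) % 1000000007) t

lemma pv_fwd_snd (xs : List Int) : ∀ (acc : Int) (l : List Int),
    (xs.foldl (fun (st : Int × List Int) v =>
        ((st.1 + v) % 1000000007, st.2 ++ [(st.1 + v) % 1000000007])) (acc, l)).2
      = l ++ pv_fwdL acc xs := by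
  induction xs with
  | nil => intro acc l; simp [pv_fwdL]
  | cons v t ih =>
    intro acc l
    simp only [List.foldl_cons]
    rw [ih]
    simp [pv_fwdL]

lemma pv_fwdL_length : ∀ (xs : List Int) (acc : Int), (pv_fwdL acc xs).length = xs.length := by
  intro xs
  induction xs with
  | nil => intro acc; rfl
  | cons v t ih => intro acc; simp [pv_fwdL, ih]

lemma pv_fwdL_getD : ∀ (xs : List Int) (acc : Int) (t : Nat), t < xs.length →
    (pv_fwdL acc xs).getD t 0 = (acc + (xs.take (t+1)).sum) % 1000000007 := by
  intro xs
  induction xs with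
  | nil => intro acc t ht; simp at ht
  | cons v tl ih =>
    intro acc t ht
    cases t with
    | zero => simp [pv_fwdL, List.getD]
    | succ t =>
      have h1 := ih ((acc + v) % 1000000007) t (by simpa using ht)
      simp only [pv_fwdL, List.getD_cons_succ]
      rw [h1, List.take_succ_cons, List.sum_cons]
      omega

-- the backward append-then-accumulate sweep (A's '>' row characterisation)
def pv_bwdL (acc : Int) : List Int → List Int
  | [] => []
  | v :: t => acc :: pv_bwdL ((acc + v) % 1000000007) t

lemma pv_bwd_snd (ys : List Int) : ∀ (acc : Int) (l : List Int),
    (ys.foldl (fun (st : Int × List Int) v =>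
        ((st.1 + v) % 1000000007, st.2 ++ [st.1])) (acc, l)).2
      = l ++ pv_bwdL acc ys := by
  induction ys with
  | nil => intro acc l; simp [pv_bwdL]
  | cons v t ih =>
    intro acc l
    simp only [List.foldl_cons]
    rw [ih]
    simp [pv_bwdL]

lemma pv_bwdL_length : ∀ (ys : List Int) (acc : Int), (pv_bwdL acc ys).length = ys.length := by
  intro ys
  induction ys with
  | nil => intro acc; rfl
  | cons v t ih => intro acc; simp [pv_bwdL, ih]

lemma pv_bwdL_getD : ∀ (ys : List Int) (acc : Int), acc % 1000000007 = acc →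
    ∀ t, t < ys.length → (pv_bwdL acc ys).getD t 0 = (acc + (ys.take t).sum) % 1000000007 := by
  intro ys
  induction ys with
  | nil => intro acc hacc t ht; simp at ht
  | cons v tl ih =>
    intro acc hacc t ht
    cases t with
    | zero => simp [pv_bwdL, List.getD]; omega
    | succ t =>
      have h1 := ih ((acc + v) % 1000000007) (by omega) t (by simpa using ht)
      simp only [pv_bwdL, List.getD_cons_succ]
      rw [h1, List.take_succ_cons, List.sum_cons]
      omega

lemma pv_rev_take_sum (xs : List Int) (c : Nat) :
    (xs.reverse.take c).sum = (xs.drop (xs.length - c)).sum := by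
  rw [List.take_reverse, List.sum_reverse]

-- A's per-step table write (let-free restatement of port A's loop body)
def pv_stepA (s : String) (N : Nat) (dp : List (List Int)) (i : Nat) : List (List Int) :=
  dp.set (i + 1)
    ((List.range (N - i)).foldl (fun row less =>
        row.set less
          ((if s.toList.getD i ' ' = '<' then
              ((List.range (N - i)).foldl
                (fun r j => r.set (j + 1) ((r.getD j 0 + (dp.getD i []).getD j 0) % 1000000007))
                (List.replicate (N + 1 - i) 0)).getD (less + 1) 0
            else
              (((List.range (N - i)).foldl
                (fun r j => r.set (j + 1) ((r.getD j 0 + (dp.getD i []).getD j 0) % 1000000007))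
                (List.replicate (N + 1 - i) 0)).getD (N - i) 0 -
               ((List.range (N - i)).foldl
                (fun r j => r.set (j + 1) ((r.getD j 0 + (dp.getD i []).getD j 0) % 1000000007))
                (List.replicate (N + 1 - i) 0)).getD (less + 1) 0 + 1000000007)) % 1000000007))
      (dp.getD (i + 1) []))

-- the clean single-row recurrence A's table follows (proof-side abstraction of A, not B's port)
def pv_rowStep (s : String) (N : Nat) (row : List Int) (i : Nat) : List Int :=
  if s.toList.getD i ' ' = '<' then
    ((row.take (N - i)).foldl (fun (st : Int × List Int) v =>
        ((st.1 + v) % 1000000007, st.2 ++ [(st.1 + v) % 1000000007])) ((0 : Int), ([] : List Int))).2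
  else
    (((row.take (N - i)).reverse.foldl (fun (st : Int × List Int) v =>
        ((st.1 + v) % 1000000007, st.2 ++ [st.1])) ((0 : Int), ([] : List Int))).2).reverse

def pv_initA (N : Nat) : List (List Int) :=
  (List.range N).foldl (fun dp i => dp.set 0 ((dp.getD 0 []).set i 1))
    (List.replicate N (List.replicate N 0))

def pv_Rr (s : String) (N k : Nat) : List Int :=
  (List.range k).foldl (pv_rowStep s N) (List.replicate N 1)

lemma pv_solve_eq (n : Int) (s : String) :
    solve n s = (((List.range (n.toNat - 1)).foldl (pv_stepA s n.toNat) (pv_initA n.toNat)).getD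
      (n.toNat - 1) []).getD 0 0 % 1000000007 := rfl

-- the invariant tying A's dp table row k to the clean row recurrence
def pv_Inv (N k : Nat) (dp : List (List Int)) (row : List Int) : Prop :=
  dp.length = N ∧ (∀ r, r < N → (dp.getD r []).length = N) ∧
  N - k ≤ row.length ∧ (∀ t, t < N - k → (dp.getD k []).getD t 0 = row.getD t 0)

lemma pv_set_self (l : List (List Int)) (h : 0 < l.length) : l.set 0 (l.getD 0 []) = l := by
  apply List.ext_getElem (by simp)
  intro i h1 h2
  rw [List.getElem_set]
  split
  · next heq => subst heq; rw [List.getD_eq_getElem _ _ h]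
  · rfl

lemma pv_init_comm (dp0 : List (List Int)) (h : 0 < dp0.length) : ∀ k,
    (List.range k).foldl (fun dp i => dp.set 0 ((dp.getD 0 []).set i 1)) dp0
      = dp0.set 0 ((List.range k).foldl (fun r i => r.set i 1) (dp0.getD 0 [])) := by
  intro k
  induction k with
  | zero =>
    simp only [List.range_zero, List.foldl_nil]
    exact (pv_set_self dp0 h).symm
  | succ k ih =>
    rw [List.range_succ, List.foldl_append, List.foldl_append, ih]
    simp only [List.foldl_cons, List.foldl_nil]
    rw [pv_getD_set_self ([] : List Int) dp0 0 _ h, List.set_set]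

lemma pv_getD_replicate {a : Type} (d x : a) {N r : Nat} (h : r < N) :
    (List.replicate N x).getD r d = x := by
  simp [List.getD, h]

lemma pv_inv_init (N : Nat) (hN : 1 ≤ N) : pv_Inv N 0 (pv_initA N) (List.replicate N 1) := by
  have h0 : 0 < (List.replicate N (List.replicate N (0 : Int))).length := by simp; omega
  have hcomm := pv_init_comm (List.replicate N (List.replicate N 0)) h0 N
  have hd0 : (List.replicate N (List.replicate N (0 : Int))).getD 0 [] = List.replicate N 0 :=
    pv_getD_replicate _ _ hN
  have hRlen : ((List.range N).foldl (fun r i => r.set i 1) (List.replicate N (0 : Int))).length = N := by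
    rw [pv_foldl_length _ (by intro r j; simp) _ _]; simp
  refine ⟨?_, ?_, ?_, ?_⟩
  · rw [pv_initA, hcomm]; simp
  · intro r hr
    rw [pv_initA, hcomm, hd0]
    by_cases h : r = 0
    · subst h
      rw [pv_getD_set_self _ _ _ _ (by simpa using hN), hRlen]
    · rw [pv_getD_set_ne _ _ _ (fun he => h he.symm), pv_getD_replicate _ _ hr]
      simp
  · simp
  · intro t ht
    rw [pv_initA, hcomm, hd0, pv_getD_set_self _ _ _ _ (by simpa using hN)]
    have := pv_foldl_set_getD (fun _ => (1 : Int)) N (List.replicate N 0) t (by simpa using (by omega : t < N))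
    simp only [] at this
    rw [this, if_pos (by omega : t < N), pv_getD_replicate _ _ (by omega : t < N)]

lemma pv_inv_step (s : String) (N k : Nat) (hk : k < N - 1) (dp : List (List Int)) (row : List Int)
    (h : pv_Inv N k dp row) : pv_Inv N (k+1) (pv_stepA s N dp k) (pv_rowStep s N row k) := by
  obtain ⟨hdp, hrows, hrl, hpt⟩ := h
  have hkN : k < N := by omega
  have hk1N : k + 1 < N := by omega
  have halen : (dp.getD k []).length = N := hrows k hkN
  have hblen : (dp.getD (k+1) []).length = N := hrows (k+1) hk1N
  have hxlen : ((dp.getD k []).take (N - k)).length = N - k := by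
    rw [List.length_take]; omega
  have hxlen' : (row.take (N - k)).length = N - k := by
    rw [List.length_take]; omega
  have hxeq : (dp.getD k []).take (N - k) = row.take (N - k) := by
    apply pv_eq_of_getD _ _ (by rw [hxlen, hxlen'])
    intro t ht
    rw [hxlen] at ht
    rw [pv_getD_take _ ht, pv_getD_take _ ht]
    exact hpt t (by omega)
  -- rui values
  have hrui : ∀ t, 1 ≤ t → t ≤ N - k →
      (((List.range (N - k)).foldl
        (fun r j => r.set (j + 1) ((r.getD j 0 + (dp.getD k []).getD j 0) % 1000000007))
        (List.replicate (N + 1 - k) 0)).getD t 0)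
        = (((dp.getD k []).take (N - k)).take t).sum % 1000000007 := by
    intro t h1 h2
    rw [pv_rui_getD (dp.getD k []) (N + 1 - k) (N - k) (by omega) t, if_pos ⟨h1, h2⟩,
      List.take_take, Nat.min_eq_left h2]
  -- A's freshly written row, pointwise
  have hAR : ∀ t, t < N →
      (((List.range (N - k)).foldl (fun r less =>
          r.set less
            ((if s.toList.getD k ' ' = '<' then
                ((List.range (N - k)).foldl
                  (fun r j => r.set (j + 1) ((r.getD j 0 + (dp.getD k []).getD j 0) % 1000000007))
                  (List.replicate (N + 1 - k) 0)).getD (less + 1) 0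
              else
                ((List.range (N - k)).foldl
                  (fun r j => r.set (j + 1) ((r.getD j 0 + (dp.getD k []).getD j 0) % 1000000007))
                  (List.replicate (N + 1 - k) 0)).getD (N - k) 0 -
                ((List.range (N - k)).foldl
                  (fun r j => r.set (j + 1) ((r.getD j 0 + (dp.getD k []).getD j 0) % 1000000007))
                  (List.replicate (N + 1 - k) 0)).getD (less + 1) 0 + 1000000007) % 1000000007))
        (dp.getD (k + 1) [])).getD t 0)
      = if t < N - k then
          (if s.toList.getD k ' ' = '<' then
            ((List.range (N - k)).foldl
              (fun r j => r.set (j + 1) ((r.getD j 0 + (dp.getD k []).getD j 0) % 1000000007))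
              (List.replicate (N + 1 - k) 0)).getD (t + 1) 0
          else
            ((List.range (N - k)).foldl
              (fun r j => r.set (j + 1) ((r.getD j 0 + (dp.getD k []).getD j 0) % 1000000007))
              (List.replicate (N + 1 - k) 0)).getD (N - k) 0 -
            ((List.range (N - k)).foldl
              (fun r j => r.set (j + 1) ((r.getD j 0 + (dp.getD k []).getD j 0) % 1000000007))
              (List.replicate (N + 1 - k) 0)).getD (t + 1) 0 + 1000000007) % 1000000007
        else (dp.getD (k + 1) []).getD t 0 := by
    intro t ht
    exact pv_foldl_set_getD _ (N - k) (dp.getD (k + 1) []) t (by omega)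
  have hARlen :
      ((List.range (N - k)).foldl (fun r less =>
          r.set less
            ((if s.toList.getD k ' ' = '<' then
                ((List.range (N - k)).foldl
                  (fun r j => r.set (j + 1) ((r.getD j 0 + (dp.getD k []).getD j 0) % 1000000007))
                  (List.replicate (N + 1 - k) 0)).getD (less + 1) 0
              else
                ((List.range (N - k)).foldl
                  (fun r j => r.set (j + 1) ((r.getD j 0 + (dp.getD k []).getD j 0) % 1000000007))
                  (List.replicate (N + 1 - k) 0)).getD (N - k) 0 -
                ((List.range (N - k)).foldl
                  (fun r j => r.set (j + 1) ((r.getD j 0 + (dp.getD k []).getD j 0) % 1000000007))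
                  (List.replicate (N + 1 - k) 0)).getD (less + 1) 0 + 1000000007) % 1000000007))
        (dp.getD (k + 1) [])).length = N := by
    rw [pv_foldl_length _ (by intro r j; simp) _ _, hblen]
  refine ⟨?_, ?_, ?_, ?_⟩
  · simp only [pv_stepA, List.length_set]; exact hdp
  · intro r hr
    simp only [pv_stepA]
    by_cases hr1 : r = k + 1
    · subst hr1
      rw [pv_getD_set_self _ _ _ _ (by omega)]
      exact hARlen
    · rw [pv_getD_set_ne _ _ _ (fun he => hr1 he.symm)]
      exact hrows r hr
  · simp only [pv_rowStep]
    by_cases hc : s.toList.getD k ' ' = '<'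
    · rw [if_pos hc, pv_fwd_snd, List.nil_append, pv_fwdL_length, hxlen']
      omega
    · rw [if_neg hc, pv_bwd_snd, List.nil_append, List.length_reverse, pv_bwdL_length,
        List.length_reverse, hxlen']
      omega
  · intro t ht
    have htm : t < N - k := by omega
    simp only [pv_stepA, pv_rowStep]
    rw [pv_getD_set_self _ _ _ _ (by omega), hAR t (by omega), if_pos htm]
    by_cases hc : s.toList.getD k ' ' = '<'
    · rw [if_pos hc, if_pos hc, pv_fwd_snd, List.nil_append,
        pv_fwdL_getD _ 0 t (by omega : t < (row.take (N - k)).length),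
        ← hxeq, hrui (t + 1) (by omega) (by omega)]
      omega
    · rw [if_neg hc, if_neg hc, pv_bwd_snd, List.nil_append]
      have hbl : (pv_bwdL 0 (row.take (N - k)).reverse).length = N - k := by
        rw [pv_bwdL_length, List.length_reverse, hxlen']
      rw [pv_getD_reverse _ t (by omega), hbl,
        pv_bwdL_getD _ 0 (by decide) (N - k - 1 - t) (by rw [List.length_reverse, hxlen']; omega),
        pv_rev_take_sum, hxlen',
        (by omega : N - k - (N - k - 1 - t) = t + 1), ← hxeq,
        hrui (N - k) (by omega) (by omega), hrui (t + 1) (by omega) (by omega),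
        List.take_take, Nat.min_self]
      have hsplit := List.sum_take_add_sum_drop ((dp.getD k []).take (N - k)) (t + 1)
      omega

lemma pv_inv_fold (s : String) (N : Nat) (hN : 1 ≤ N) : ∀ k, k ≤ N - 1 →
    pv_Inv N k ((List.range k).foldl (pv_stepA s N) (pv_initA N)) (pv_Rr s N k) := by
  intro k
  induction k with
  | zero => intro _; simpa [pv_Rr] using pv_inv_init N hN
  | succ k ih =>
    intro hk
    rw [pv_Rr, List.range_succ, List.foldl_append, List.foldl_append]
    simp only [List.foldl_cons, List.foldl_nil]
    exact pv_inv_step s N k (by omega) _ _ (ih (by omega))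

-- A characterised by the clean row recurrence
lemma pv_solveA_char (n : Int) (s : String) (hn : 1 ≤ n) :
    solve n s = (pv_Rr s n.toNat (n.toNat - 1)).getD 0 0 % 1000000007 := by
  have hN : 1 ≤ n.toNat := by omega
  rw [pv_solve_eq]
  obtain ⟨_, _, _, hpt⟩ := pv_inv_fold s n.toNat hN (n.toNat - 1) le_rfl
  rw [hpt 0 (by omega)]

lemma pv_Rr_succ (s : String) (N k : Nat) :
    pv_Rr s N (k + 1) = pv_rowStep s N (pv_Rr s N k) k := by
  rw [pv_Rr, pv_Rr, List.range_succ, List.foldl_append]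
  simp

-- ===== B-side abstractions =====

-- one backward coefficient step (transpose of pv_rowStep's linear map)
def pv_T (c : Char) (u : List Int) : List Int :=
  if c = '<' then (pv_fwdL 0 u.reverse).reverse ++ [0] else 0 :: pv_fwdL 0 u

-- the coefficient vector after processing pattern indices N-2, …, N-1-m
def pv_U (s : List Char) (N : Nat) : Nat → List Int
  | 0 => [1]
  | m + 1 => pv_T (s.getD (N - 2 - m) ' ') (pv_U s N m)

lemma pv_T_length (c : Char) (u : List Int) : (pv_T c u).length = u.length + 1 := by
  unfold pv_T
  split <;> simp [pv_fwdL_length]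

lemma pv_U_length (s : List Char) (N : Nat) : ∀ m, (pv_U s N m).length = m + 1 := by
  intro m
  induction m with
  | zero => rfl
  | succ m ih => rw [pv_U, pv_T_length, ih]

-- B equals the abstract backward recursion
lemma pv_solve_alt_eq (n : Int) (s : String) (hn : 1 ≤ n) :
    solve_alt n s = (pv_U s.toList n.toNat (n.toNat - 1)).sum % 1000000007 := by
  show ((PySem.List.pyRange (n - 2) (-1) (-1)).foldl (fun u i =>
    if s.toList.getD i.toNat ' ' = '<' then
      ((u.reverse.foldl (fun (st : Int × List Int) x =>
          ((st.1 + x) % 1000000007, st.2 ++ [(st.1 + x) % 1000000007]))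
          ((0 : Int), ([] : List Int))).2).reverse ++ [0]
    else
      (u.foldl (fun (st : Int × List Int) x =>
          ((st.1 + x) % 1000000007, st.2 ++ [(st.1 + x) % 1000000007]))
          ((0 : Int), [(0 : Int)])).2) [(1 : Int)]).sum % 1000000007 = _
  rw [PySem.List.pyRange_neg_one, List.foldl_map]
  have hcnt : ((n - 2) - (-1)).toNat = n.toNat - 1 := by omega
  rw [hcnt]
  have haux : ∀ m, m ≤ n.toNat - 1 →
      ((List.range m).foldl (fun (u : List Int) (k : Nat) =>
        if s.toList.getD (n - 2 - (k : Int)).toNat ' ' = '<' then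
          ((u.reverse.foldl (fun (st : Int × List Int) x =>
              ((st.1 + x) % 1000000007, st.2 ++ [(st.1 + x) % 1000000007]))
              ((0 : Int), ([] : List Int))).2).reverse ++ [0]
        else
          (u.foldl (fun (st : Int × List Int) x =>
              ((st.1 + x) % 1000000007, st.2 ++ [(st.1 + x) % 1000000007]))
              ((0 : Int), [(0 : Int)])).2) [(1 : Int)])
      = pv_U s.toList n.toNat m := by
    intro m
    induction m with
    | zero => intro _; rfl
    | succ m ih =>
      intro hm
      rw [List.range_succ, List.foldl_append, ih (by omega)]
      simp only [List.foldl_cons, List.foldl_nil]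
      have hidx : (n - 2 - (m : Int)).toNat = n.toNat - 2 - m := by omega
      rw [hidx]
      show _ = pv_T (s.toList.getD (n.toNat - 2 - m) ' ') (pv_U s.toList n.toNat m)
      unfold pv_T
      by_cases hc : s.toList.getD (n.toNat - 2 - m) ' ' = '<'
      · rw [if_pos hc, if_pos hc, pv_fwd_snd, List.nil_append]
      · rw [if_neg hc, if_neg hc, pv_fwd_snd]
        rfl
  rw [haux (n.toNat - 1) le_rfl]

-- sums of take/drop as Finset sums
lemma pv_sum_take_eq (xs : List Int) : ∀ c, c ≤ xs.length →
    (xs.take c).sum = ∑ l ∈ Finset.range c, xs.getD l 0 := by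
  intro c
  induction c with
  | zero => intro _; simp
  | succ c ih =>
    intro hc
    rw [pv_take_succ_sum, ih (by omega), Finset.sum_range_succ]

lemma pv_sum_drop_take (xs : List Int) (a m : Nat) (ha : a ≤ m) (hm : m ≤ xs.length) :
    ((xs.take m).drop a).sum = ∑ l ∈ Finset.Ico a m, xs.getD l 0 := by
  have h1 := List.sum_take_add_sum_drop (xs.take m) a
  have h2 : ((xs.take m).take a) = xs.take a := by
    rw [List.take_take, Nat.min_eq_left ha]
  rw [h2, pv_sum_take_eq xs m hm, pv_sum_take_eq xs a (by omega)] at h1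
  have h3 : (∑ l ∈ Finset.Ico a m, xs.getD l 0)
      = (∑ l ∈ Finset.range m, xs.getD l 0) - ∑ l ∈ Finset.range a, xs.getD l 0 := by
    rw [Finset.sum_Ico_eq_sub _ ha]
  omega

lemma pv_sum_getD (xs : List Int) : ∑ l ∈ Finset.range xs.length, xs.getD l 0 = xs.sum := by
  rw [← pv_sum_take_eq xs xs.length le_rfl, List.take_length]

-- casting helper
lemma pv_cast_mod (a : Int) :
    ((a % 1000000007 : Int) : ZMod 1000000007) = (a : ZMod 1000000007) := by
  have h : ((1000000007 : Nat) : Int) = (1000000007 : Int) := by norm_num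
  rw [← h, ZMod.intCast_mod]

-- pointwise value of the clean forward row step, in ZMod
lemma pv_rowStep_lt_cast (s : String) (N k j : Nat) (row : List Int)
    (hc : s.toList.getD k ' ' = '<') (hj : j < N - k) (hlen : N - k ≤ row.length) :
    (((pv_rowStep s N row k).getD j 0 : Int) : ZMod 1000000007)
      = ∑ l ∈ Finset.range (j + 1), ((row.getD l 0 : Int) : ZMod 1000000007) := by
  unfold pv_rowStep
  rw [if_pos hc, pv_fwd_snd, List.nil_append,
    pv_fwdL_getD _ 0 j (by rw [List.length_take]; omega), zero_add,
    List.take_take, Nat.min_eq_left (by omega),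
    pv_sum_take_eq row (j + 1) (by omega), pv_cast_mod]
  push_cast
  rfl

lemma pv_rowStep_gt_cast (s : String) (N k j : Nat) (row : List Int)
    (hc : ¬ s.toList.getD k ' ' = '<') (hj : j < N - k) (hlen : N - k ≤ row.length) :
    (((pv_rowStep s N row k).getD j 0 : Int) : ZMod 1000000007)
      = ∑ l ∈ Finset.Ico (j + 1) (N - k), ((row.getD l 0 : Int) : ZMod 1000000007) := by
  unfold pv_rowStep
  have hxlen : (row.take (N - k)).length = N - k := by rw [List.length_take]; omega
  have hbl : (pv_bwdL 0 (row.take (N - k)).reverse).length = N - k := by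
    rw [pv_bwdL_length, List.length_reverse, hxlen]
  rw [if_neg hc, pv_bwd_snd, List.nil_append, pv_getD_reverse _ j (by rw [hbl]; omega), hbl,
    pv_bwdL_getD _ 0 (by decide) (N - k - 1 - j) (by rw [List.length_reverse, hxlen]; omega),
    zero_add, pv_rev_take_sum, hxlen,
    (by omega : N - k - (N - k - 1 - j) = j + 1),
    pv_sum_drop_take row (j + 1) (N - k) (by omega) hlen, pv_cast_mod]
  push_cast
  rfl

-- pointwise value of the transposed coefficient step, in ZMod
lemma pv_T_lt_cast (u : List Int) (j : Nat) (hj : j ≤ u.length) :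
    (((pv_T '<' u).getD j 0 : Int) : ZMod 1000000007)
      = ∑ l ∈ Finset.Ico j u.length, ((u.getD l 0 : Int) : ZMod 1000000007) := by
  unfold pv_T
  rw [if_pos rfl]
  by_cases hq : j = u.length
  · subst hq
    have hl : ((pv_fwdL 0 u.reverse).reverse).length = u.length := by
      simp [pv_fwdL_length]
    rw [List.getD_eq_getElem?_getD, List.getElem?_append_right (by rw [hl]), hl]
    simp
  · have hj' : j < u.length := by omega
    have hrl : ((pv_fwdL 0 u.reverse).reverse).length = u.length := by
      simp [pv_fwdL_length]
    rw [List.getD_append _ _ _ _ (by rw [hrl]; omega),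
      pv_getD_reverse _ j (by rw [pv_fwdL_length, List.length_reverse]; omega),
      pv_fwdL_length, List.length_reverse,
      pv_fwdL_getD _ 0 (u.length - 1 - j) (by rw [List.length_reverse]; omega), zero_add,
      (by omega : u.length - 1 - j + 1 = u.length - j),
      pv_rev_take_sum, (by omega : u.length - (u.length - j) = j)]
    have hdt : u.drop j = (u.take u.length).drop j := by rw [List.take_length]
    rw [hdt, pv_sum_drop_take u j u.length (by omega) le_rfl, pv_cast_mod]
    push_cast
    rfl

lemma pv_T_gt_cast (c : Char) (hc : ¬ c = '<') (u : List Int) (j : Nat) (hj : j ≤ u.length) :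
    (((pv_T c u).getD j 0 : Int) : ZMod 1000000007)
      = ∑ l ∈ Finset.range j, ((u.getD l 0 : Int) : ZMod 1000000007) := by
  unfold pv_T
  rw [if_neg hc]
  cases j with
  | zero => simp
  | succ t =>
    rw [List.getD_cons_succ, pv_fwdL_getD _ 0 t (by omega), zero_add,
      pv_sum_take_eq u (t + 1) (by omega), pv_cast_mod]
    push_cast
    rfl

-- Ico / bounded sums as filtered range sums
lemma pv_Ico_as_ite (q : Nat) (j : Nat) (h : Nat → ZMod 1000000007) :
    (∑ l ∈ Finset.Ico j q, h l) = ∑ l ∈ Finset.range q, if j ≤ l then h l else 0 := by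
  rw [Finset.sum_ite, Finset.sum_const_zero, add_zero]
  apply Finset.sum_congr _ (fun _ _ => rfl)
  ext x
  simp only [Finset.mem_Ico, Finset.mem_filter, Finset.mem_range]
  omega

lemma pv_sum_ite_lt (M c : Nat) (h : c ≤ M) (t : Nat → ZMod 1000000007) :
    (∑ j ∈ Finset.range M, if j < c then t j else 0) = ∑ j ∈ Finset.range c, t j := by
  rw [Finset.sum_ite, Finset.sum_const_zero, add_zero]
  apply Finset.sum_congr _ (fun _ _ => rfl)
  ext x
  simp only [Finset.mem_filter, Finset.mem_range]
  omega

lemma pv_sum_ite_le (M c : Nat) (h : c < M) (t : Nat → ZMod 1000000007) :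
    (∑ j ∈ Finset.range M, if j ≤ c then t j else 0) = ∑ j ∈ Finset.range (c + 1), t j := by
  rw [Finset.sum_ite, Finset.sum_const_zero, add_zero]
  apply Finset.sum_congr _ (fun _ _ => rfl)
  ext x
  simp only [Finset.mem_filter, Finset.mem_range]
  omega

lemma pv_sum_ite_gt (M c : Nat) (t : Nat → ZMod 1000000007) :
    (∑ j ∈ Finset.range M, if c < j then t j else 0) = ∑ j ∈ Finset.Ico (c + 1) M, t j := by
  rw [Finset.sum_ite, Finset.sum_const_zero, add_zero]
  apply Finset.sum_congr _ (fun _ _ => rfl)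
  ext x
  simp only [Finset.mem_filter, Finset.mem_range, Finset.mem_Ico]
  omega

-- double-sum exchange for the '<' step
lemma pv_exch_lt (q : Nat) (f g : Nat → ZMod 1000000007) :
    (∑ j ∈ Finset.range (q + 1), (∑ l ∈ Finset.Ico j q, f l) * g j)
      = ∑ l ∈ Finset.range q, f l * (∑ j ∈ Finset.range (l + 1), g j) := by
  have h1 : ∀ j, (∑ l ∈ Finset.Ico j q, f l) * g j
      = ∑ l ∈ Finset.range q, (if j ≤ l then f l * g j else 0) := by
    intro j
    rw [pv_Ico_as_ite, Finset.sum_mul]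
    apply Finset.sum_congr rfl
    intro l _
    split <;> simp
  calc (∑ j ∈ Finset.range (q + 1), (∑ l ∈ Finset.Ico j q, f l) * g j)
      = ∑ j ∈ Finset.range (q + 1), ∑ l ∈ Finset.range q, (if j ≤ l then f l * g j else 0) :=
        Finset.sum_congr rfl (fun j _ => h1 j)
    _ = ∑ l ∈ Finset.range q, ∑ j ∈ Finset.range (q + 1), (if j ≤ l then f l * g j else 0) :=
        Finset.sum_comm
    _ = ∑ l ∈ Finset.range q, f l * (∑ j ∈ Finset.range (l + 1), g j) := by
        apply Finset.sum_congr rfl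
        intro l hl
        rw [Finset.mem_range] at hl
        rw [Finset.mul_sum]
        exact pv_sum_ite_le (q + 1) l (by omega) (fun j => f l * g j)

-- double-sum exchange for the '>' step
lemma pv_exch_gt (q : Nat) (f g : Nat → ZMod 1000000007) :
    (∑ j ∈ Finset.range (q + 1), (∑ l ∈ Finset.range j, f l) * g j)
      = ∑ l ∈ Finset.range q, f l * (∑ j ∈ Finset.Ico (l + 1) (q + 1), g j) := by
  have h1 : ∀ j ∈ Finset.range (q + 1), (∑ l ∈ Finset.range j, f l) * g j
      = ∑ l ∈ Finset.range q, (if l < j then f l * g j else 0) := by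
    intro j hj
    rw [Finset.mem_range] at hj
    rw [Finset.sum_mul]
    exact (pv_sum_ite_lt q j (by omega) (fun l => f l * g j)).symm
  calc (∑ j ∈ Finset.range (q + 1), (∑ l ∈ Finset.range j, f l) * g j)
      = ∑ j ∈ Finset.range (q + 1), ∑ l ∈ Finset.range q, (if l < j then f l * g j else 0) :=
        Finset.sum_congr rfl h1
    _ = ∑ l ∈ Finset.range q, ∑ j ∈ Finset.range (q + 1), (if l < j then f l * g j else 0) :=
        Finset.sum_comm
    _ = ∑ l ∈ Finset.range q, f l * (∑ j ∈ Finset.Ico (l + 1) (q + 1), g j) := by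
        apply Finset.sum_congr rfl
        intro l _
        rw [Finset.mul_sum]
        exact pv_sum_ite_gt (q + 1) l (fun j => f l * g j)

-- one step of the bilinear invariant
lemma pv_dot_step (s : String) (N k : Nat) (hk : k < N - 1) (u row : List Int)
    (hu : u.length = N - k - 1) (hrow : N - k ≤ row.length) :
    (∑ j ∈ Finset.range (N - k),
        (((pv_T (s.toList.getD k ' ') u).getD j 0 : Int) : ZMod 1000000007)
          * ((row.getD j 0 : Int) : ZMod 1000000007))
      = ∑ j ∈ Finset.range (N - k - 1),
          ((u.getD j 0 : Int) : ZMod 1000000007)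
            * (((pv_rowStep s N row k).getD j 0 : Int) : ZMod 1000000007) := by
  have hq : N - k = (N - k - 1) + 1 := by omega
  by_cases hc : s.toList.getD k ' ' = '<'
  · rw [hq]
    have hL : ∀ j ∈ Finset.range ((N - k - 1) + 1),
        (((pv_T (s.toList.getD k ' ') u).getD j 0 : Int) : ZMod 1000000007)
          * ((row.getD j 0 : Int) : ZMod 1000000007)
        = (∑ l ∈ Finset.Ico j (N - k - 1), ((u.getD l 0 : Int) : ZMod 1000000007))
          * ((row.getD j 0 : Int) : ZMod 1000000007) := by
      intro j hj
      rw [Finset.mem_range] at hj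
      rw [hc, pv_T_lt_cast u j (by omega), hu]
    rw [Finset.sum_congr rfl hL, pv_exch_lt]
    apply Finset.sum_congr rfl
    intro j hj
    rw [Finset.mem_range] at hj
    rw [pv_rowStep_lt_cast s N k j row hc (by omega) hrow]
  · rw [hq]
    have hL : ∀ j ∈ Finset.range ((N - k - 1) + 1),
        (((pv_T (s.toList.getD k ' ') u).getD j 0 : Int) : ZMod 1000000007)
          * ((row.getD j 0 : Int) : ZMod 1000000007)
        = (∑ l ∈ Finset.range j, ((u.getD l 0 : Int) : ZMod 1000000007))
          * ((row.getD j 0 : Int) : ZMod 1000000007) := by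
      intro j hj
      rw [Finset.mem_range] at hj
      rw [pv_T_gt_cast _ hc u j (by omega)]
    rw [Finset.sum_congr rfl hL, pv_exch_gt]
    apply Finset.sum_congr rfl
    intro j hj
    rw [Finset.mem_range] at hj
    rw [pv_rowStep_gt_cast s N k j row hc (by omega) hrow, ← hq]

-- the bilinear invariant: the dot product of coefficients with the forward row is constant
lemma pv_dot_inv (s : String) (N : Nat) (hN : 1 ≤ N) : ∀ m, m ≤ N - 1 →
    (∑ j ∈ Finset.range (m + 1),
        (((pv_U s.toList N m).getD j 0 : Int) : ZMod 1000000007)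
          * (((pv_Rr s N (N - 1 - m)).getD j 0 : Int) : ZMod 1000000007))
      = (((pv_Rr s N (N - 1)).getD 0 0 : Int) : ZMod 1000000007) := by
  intro m
  induction m with
  | zero =>
    intro _
    simp [pv_U]
  | succ m ih =>
    intro hm
    have hk : N - 1 - (m + 1) = N - 2 - m := by omega
    have hstep := pv_dot_step s N (N - 2 - m) (by omega)
      (pv_U s.toList N m) (pv_Rr s N (N - 2 - m))
      (by rw [pv_U_length]; omega)
      (by
        obtain ⟨_, _, h3, _⟩ := pv_inv_fold s N hN (N - 2 - m) (by omega)
        exact h3)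
    rw [(by omega : N - (N - 2 - m) = m + 2)] at hstep
    rw [(by omega : m + 2 - 1 = m + 1)] at hstep
    have hU : pv_U s.toList N (m + 1) = pv_T (s.toList.getD (N - 2 - m) ' ') (pv_U s.toList N m) := rfl
    have hR : pv_rowStep s N (pv_Rr s N (N - 2 - m)) (N - 2 - m) = pv_Rr s N (N - 2 - m + 1) :=
      (pv_Rr_succ s N (N - 2 - m)).symm
    have hk1 : N - 2 - m + 1 = N - 1 - m := by omega
    rw [(by omega : m + 1 + 1 = m + 2), hk, hU, hstep, hR, hk1]
    exact ih (by omega)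

-- ===== VERDICT (by name: the statement is the Claim_ definition above) =====
theorem solve_spec : Claim_equal_solve := by
  intro n s _ hpre
  obtain ⟨hn, _⟩ := hpre
  have hN : 1 ≤ n.toNat := by omega
  show solve n s = solve_alt n s
  rw [pv_solveA_char n s hn, pv_solve_alt_eq n s hn]
  have hdot := pv_dot_inv s n.toNat hN (n.toNat - 1) le_rfl
  have hones : ∀ j ∈ Finset.range (n.toNat - 1 + 1),
      (((pv_U s.toList n.toNat (n.toNat - 1)).getD j 0 : Int) : ZMod 1000000007)
        * (((pv_Rr s n.toNat 0).getD j 0 : Int) : ZMod 1000000007)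
      = (((pv_U s.toList n.toNat (n.toNat - 1)).getD j 0 : Int) : ZMod 1000000007) := by
    intro j hj
    rw [Finset.mem_range] at hj
    have : (pv_Rr s n.toNat 0).getD j 0 = 1 := by
      rw [pv_Rr]
      simp only [List.range_zero, List.foldl_nil]
      exact pv_getD_replicate _ _ (by omega)
    rw [this]
    simp
  have hsub : n.toNat - 1 - (n.toNat - 1) = 0 := by omega
  rw [hsub, Finset.sum_congr rfl hones] at hdot
  have hsum : (∑ j ∈ Finset.range (n.toNat - 1 + 1),
      (((pv_U s.toList n.toNat (n.toNat - 1)).getD j 0 : Int) : ZMod 1000000007))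
      = (((pv_U s.toList n.toNat (n.toNat - 1)).sum : Int) : ZMod 1000000007) := by
    rw [← pv_sum_getD (pv_U s.toList n.toNat (n.toNat - 1)), pv_U_length]
    push_cast
    rfl
  rw [hsum] at hdot
  have hmod := (ZMod.intCast_eq_intCast_iff _ _ _).mp hdot.symm
  have h : ((1000000007 : Nat) : Int) = (1000000007 : Int) := by norm_num
  unfold Int.ModEq at hmod
  rw [h] at hmod
  exact hmod
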